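-- pv_equiv track=rewrite | github.com/MehmetOguzhanTor/PythonProjects | WorkingWithVowels/WorkingWithVowels.py | capitalize_vowels
-- ===== SOURCE A (Python) =====
-- def is_vowel(cr):
--     vowel_chars = 'aeiou'
--     return cr in vowel_chars
--
-- def capitalize_vowels(text):
--     output = ''
--     for i in text:
--         if is_vowel(i):
--            output += i.upper()
--         else:
--             output += i
--     return output
-- ===== SOURCE B (Python) =====
-- _TABLE = str.maketrans('aeiou', 'AEIOU')
--
-- def capitalize_vowels(text):
--     return text.translate(_TABLE)
-- ===== Notes on version B (the rewrite author's own statement) =====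
-- stated objective: idiomatic
-- what changed: Replaces the per-character membership test and string concatenation loop with a precomputed translation table (str.maketrans) applied wholesale via str.translate.
import Mathlib
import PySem

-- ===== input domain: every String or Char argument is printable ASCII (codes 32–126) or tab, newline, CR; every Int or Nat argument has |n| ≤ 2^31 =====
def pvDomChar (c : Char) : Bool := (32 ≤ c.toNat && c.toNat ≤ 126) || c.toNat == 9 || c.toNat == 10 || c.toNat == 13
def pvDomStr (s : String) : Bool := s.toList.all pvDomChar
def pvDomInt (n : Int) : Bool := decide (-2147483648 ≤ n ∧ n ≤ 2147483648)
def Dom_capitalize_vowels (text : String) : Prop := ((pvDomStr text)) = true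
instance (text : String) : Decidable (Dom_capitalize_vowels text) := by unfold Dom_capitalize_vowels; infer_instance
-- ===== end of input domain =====

-- B replaces A's per-character membership test + string concatenation loop with a
-- translation table built once and applied wholesale (str.maketrans/str.translate).

-- ===== PORT A =====
-- is_vowel(cr): 'cr in vowel_chars' is Python substring containment
def pv_is_vowel (cr : Char) : Bool := PySem.Chars.isIn [cr] "aeiou".toList

-- loop: output = ''; for i in text: output += i.upper() if vowel else i
def capitalize_vowels (text : String) : String :=
  String.mk (text.toList.foldl
    (fun output i => if pv_is_vowel i then output ++ PySem.Chars.upper [i] else output ++ [i]) [])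

-- ===== PORT B =====
-- _TABLE = str.maketrans('aeiou', 'AEIOU'): a char-to-char mapping
def pvTable : PySem.Dict Char Char := PySem.Dict.ofList (List.zip "aeiou".toList "AEIOU".toList)

-- text.translate(_TABLE): each char replaced by its table image, unmapped chars unchanged
def capitalize_vowels_alt (text : String) : String :=
  String.mk (text.toList.map (fun c => PySem.Dict.getD pvTable c c))

-- ===== PRECONDITION & SPEC =====
def Spec_capitalize_vowels (text : String) (out : String) : Prop := out = capitalize_vowels_alt text
instance (text : String) (out : String) : Decidable (Spec_capitalize_vowels text out) := by unfold Spec_capitalize_vowels; infer_instance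

-- ===== CLAIM (what is proved, stated in full; the proofs are below) =====
def Claim_equal_capitalize_vowels : Prop := ∀ (text : String), Dom_capitalize_vowels text → Spec_capitalize_vowels text (capitalize_vowels text)

-- ===== LEMMAS AND PROOFS =====
theorem pvTable_eq : pvTable = PySem.Dict.mk [('a','A'),('e','E'),('i','I'),('o','O'),('u','U')] := by
  decide

-- one character of A's loop body equals one character of B's translation
theorem char_eq (c : Char) :
    (if pv_is_vowel c then PySem.Chars.upper [c] else [c]) = [PySem.Dict.getD pvTable c c] := by
  by_cases ha : c = 'a'; · subst ha; decide
  by_cases he : c = 'e'; · subst he; decide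
  by_cases hi : c = 'i'; · subst hi; decide
  by_cases ho : c = 'o'; · subst ho; decide
  by_cases hu : c = 'u'; · subst hu; decide
  have hm : c ∉ (['a','e','i','o','u'] : List Char) := by simp [ha, he, hi, ho, hu]
  have hf : PySem.Chars.find (['a','e','i','o','u'] : List Char) [c] = -1 := by
    rw [PySem.Chars.find_eq_neg_one_iff]
    simpa [List.singleton_infix_iff] using hm
  rw [pvTable_eq]
  simp [pv_is_vowel, PySem.Chars.isIn, hf, PySem.Dict.getD,
    Ne.symm ha, Ne.symm he, Ne.symm hi, Ne.symm ho, Ne.symm hu, PySem.Dict.get?]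

theorem fold_eq_map (cs : List Char) (acc : List Char) :
    cs.foldl (fun output i => if pv_is_vowel i then output ++ PySem.Chars.upper [i] else output ++ [i]) acc
      = acc ++ cs.map (fun c => PySem.Dict.getD pvTable c c) := by
  induction cs generalizing acc with
  | nil => simp
  | cons c cs ih =>
    simp only [List.foldl, List.map]
    rw [ih]
    have hstep : (if pv_is_vowel c then acc ++ PySem.Chars.upper [c] else acc ++ [c])
        = acc ++ [PySem.Dict.getD pvTable c c] := by
      rw [← char_eq c]; by_cases hv : pv_is_vowel c <;> simp [hv]
    rw [hstep]
    simp

-- ===== VERDICT (by name: the statement is the Claim_ definition above) =====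
theorem capitalize_vowels_spec : Claim_equal_capitalize_vowels := by
  intro text _
  unfold Spec_capitalize_vowels capitalize_vowels capitalize_vowels_alt
  rw [fold_eq_map]
  simp
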